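-- pv_equiv track=rewrite | github.com/hogilkim/leetcode | 1817. Finding the Users Active Minutes.py | findingUsersActiveMinutes
-- ===== SOURCE A (Python) =====
-- from typing import List
--
-- def findingUsersActiveMinutes(logs: List[List[int]], k: int) -> List[int]:
--
--     id_to_min = {} #key:int , val:set()
--
--     for log in logs:
--         if log[0] not in id_to_min:
--             id_to_min[log[0]] = set()
--         id_to_min[log[0]].add(log[1])
--
--
--     result =[0]*k
--
--     for key in id_to_min.keys():
--         uam = len(id_to_min[key])
--
--         result[uam-1] += 1
--
--     return result
-- ===== SOURCE B (Python) =====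
-- from typing import List
--
-- def findingUsersActiveMinutes(logs: List[List[int]], k: int) -> List[int]:
--     # Partition-based recursion on users: repeatedly take the first remaining
--     # user, split the remaining pairs into its (deduped, in order) minutes and
--     # the rest, bump the histogram, and continue on the rest. No dict, no set.
--     result = [0] * k
--     rest = [(log[0], log[1]) for log in logs]
--     while rest:
--         u = rest[0][0]
--         mins = []
--         others = []
--         for uu, m in rest:
--             if uu == u:
--                 if m not in mins:
--                     mins.append(m)
--             else:
--                 others.append((uu, m))
--         result[len(mins) - 1] += 1
--         rest = others
--     return result
-- ===== Notes on version B (the rewrite author's own statement) =====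
-- stated objective: alternative
-- what changed: Replaces A's hash-based grouping (dict of minute-sets, then reading off set sizes) by a recursive partition pass: repeatedly take the first remaining user, split the remaining pairs into that user's in-order-deduped minutes and the rest, bump the histogram, recurse on the rest; no dict or set is used.
import Mathlib
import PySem

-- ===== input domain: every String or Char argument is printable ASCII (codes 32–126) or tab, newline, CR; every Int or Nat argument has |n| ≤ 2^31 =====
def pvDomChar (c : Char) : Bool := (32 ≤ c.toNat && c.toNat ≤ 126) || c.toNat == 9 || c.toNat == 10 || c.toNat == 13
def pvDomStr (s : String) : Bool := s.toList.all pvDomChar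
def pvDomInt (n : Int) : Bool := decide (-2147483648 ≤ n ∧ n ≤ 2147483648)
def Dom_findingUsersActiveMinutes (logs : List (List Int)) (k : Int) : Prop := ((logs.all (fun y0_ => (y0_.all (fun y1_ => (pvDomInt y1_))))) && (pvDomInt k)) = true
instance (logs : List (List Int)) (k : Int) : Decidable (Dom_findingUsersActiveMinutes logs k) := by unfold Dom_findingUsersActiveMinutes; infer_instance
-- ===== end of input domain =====

-- B replaces A's hash-based grouping (dict of minute-sets) by a recursive partition
-- pass on users (take the first remaining user, split off its deduped minutes,
-- recurse on the rest); same result, a genuinely different traversal.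

-- ===== PORT A =====
-- Python's `result[i] += 1` (raises IndexError out of range; such inputs are outside Pre_)
def pyIncAt (r : List Int) (i : Int) : List Int :=
  match PySem.List.pyIdx? r.length i with
  | some j => r.set j (r.getD j 0 + 1)
  | none => r

def findingUsersActiveMinutes (logs : List (List Int)) (k : Int) : List Int :=
  let idToMin : PySem.Dict Int (PySem.Set Int) :=
    logs.foldl (fun d log =>
      match PySem.List.pyGet? log 0, PySem.List.pyGet? log 1 with
      | some u, some m =>
          let d' := if d.contains u then d else d.insert u PySem.Set.empty
          d'.modify u PySem.Set.empty (fun s => PySem.Set.add s m)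
      | _, _ => d) PySem.Dict.empty
  let result := List.replicate k.toNat (0 : Int)
  idToMin.keys.foldl (fun r key =>
    let uam : Int := ((idToMin.getD key PySem.Set.empty).length : Int)
    pyIncAt r (uam - 1)) result

-- ===== PORT B =====
-- B's own `result[i] += 1` (same Python construct, transliterated for B)
def pyIncAtB (r : List Int) (i : Int) : List Int :=
  match PySem.List.pyIdx? r.length i with
  | some j => r.set j (r.getD j 0 + 1)
  | none => r

-- the inner `for uu, m in rest:` pass of B, building (mins, others)
def bScan (rest : List (Int × Int)) (u : Int) : List Int × List (Int × Int) :=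
  rest.foldl (fun acc p =>
    if p.1 == u then
      (if acc.1.contains p.2 then acc.1 else acc.1 ++ [p.2], acc.2)
    else (acc.1, acc.2 ++ [p])) ([], [])

-- the `others` half of the scan is a filter (cited by bLoop's decreasing_by)
theorem bScan_snd (rest : List (Int × Int)) (u : Int) :
    (bScan rest u).2 = rest.filter (fun q => !(q.1 == u)) := by
  suffices h : ∀ (l : List (Int × Int)) (a : List Int) (b : List (Int × Int)),
      (l.foldl (fun acc p =>
        if p.1 == u then
          (if acc.1.contains p.2 then acc.1 else acc.1 ++ [p.2], acc.2)
        else (acc.1, acc.2 ++ [p])) (a, b)).2 = b ++ l.filter (fun q => !(q.1 == u)) by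
    exact h rest [] []
  intro l
  induction l with
  | nil => intro a b; simp
  | cons p t ih =>
      intro a b
      by_cases hp : p.1 = u
      · simp only [List.foldl_cons, List.filter_cons, hp, beq_self_eq_true, if_pos,
          Bool.not_true, Bool.false_eq_true, if_neg, not_false_iff]
        exact ih _ _
      · have hb : (p.1 == u) = false := by simpa using hp
        simp only [List.foldl_cons, List.filter_cons, hb, Bool.false_eq_true, if_neg,
          not_false_iff, Bool.not_false, if_pos]
        rw [ih _ _]
        simp

-- B's while loop
def bLoop (r : List Int) (rest : List (Int × Int)) : List Int :=
  match rest with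
  | [] => r
  | p :: t =>
    let s := bScan (p :: t) p.1
    bLoop (pyIncAtB r ((s.1.length : Int) - 1)) s.2
termination_by rest.length
decreasing_by
  simp only [bScan_snd, List.filter_cons, beq_self_eq_true, Bool.not_true,
    Bool.false_eq_true, if_neg, not_false_iff, List.length_cons]
  exact Nat.lt_succ_of_le (List.length_filter_le _ _)

def findingUsersActiveMinutes_alt (logs : List (List Int)) (k : Int) : List Int :=
  let result := List.replicate k.toNat (0 : Int)
  let rest : List (Int × Int) :=
    logs.filterMap (fun log =>
      (PySem.List.pyGet? log 0).bind (fun u =>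
        (PySem.List.pyGet? log 1).map (fun m => (u, m))))
  bLoop result rest

-- ===== PRECONDITION & SPEC =====
-- distinct active minutes of user u in logs (a spec-side helper; used only by Pre_)
def pvMinutesOf (logs : List (List Int)) (u : Int) : List Int :=
  PySem.List.dedup ((logs.filter (fun l => l.getD 0 0 == u)).map (fun l => l.getD 1 0))

-- Pre_ excludes exactly the inputs on which the Python A raises IndexError: a log entry
-- shorter than 2, or a user whose number of distinct active minutes exceeds k.
def Pre_findingUsersActiveMinutes (logs : List (List Int)) (k : Int) : Prop :=
  (∀ l ∈ logs, 2 ≤ l.length) ∧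
  (∀ l ∈ logs, ((pvMinutesOf logs (l.getD 0 0)).length : Int) ≤ k)
instance (logs : List (List Int)) (k : Int) : Decidable (Pre_findingUsersActiveMinutes logs k) := by
  unfold Pre_findingUsersActiveMinutes; infer_instance

def pvWitness_findingUsersActiveMinutes : List (List Int) × Int := ([[0, 5], [1, 2], [0, 2], [0, 5]], 3)

def Spec_findingUsersActiveMinutes (logs : List (List Int)) (k : Int) (out : List Int) : Prop := out = findingUsersActiveMinutes_alt logs k
instance (logs : List (List Int)) (k : Int) (out : List Int) : Decidable (Spec_findingUsersActiveMinutes logs k out) := by unfold Spec_findingUsersActiveMinutes; infer_instance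

-- ===== CLAIM (what is proved, stated in full; the proofs are below) =====
def Claim_equal_findingUsersActiveMinutes : Prop := ∀ (logs : List (List Int)) (k : Int), Dom_findingUsersActiveMinutes logs k → Pre_findingUsersActiveMinutes logs k → Spec_findingUsersActiveMinutes logs k (findingUsersActiveMinutes logs k)

-- ===== LEMMAS AND PROOFS =====

-- the first two fields of a log entry
def pvPair (l : List Int) : Int × Int := (l.getD 0 0, l.getD 1 0)

-- A's dict-building step, on the extracted pair
def pvDStep (d : PySem.Dict Int (PySem.Set Int)) (p : Int × Int) : PySem.Dict Int (PySem.Set Int) :=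
  let d' := if d.contains p.1 then d else d.insert p.1 PySem.Set.empty
  d'.modify p.1 PySem.Set.empty (fun s => PySem.Set.add s p.2)

theorem pvPyGet2 (a b : Int) (t : List Int) :
    PySem.List.pyGet? (a :: b :: t) 0 = some a ∧ PySem.List.pyGet? (a :: b :: t) 1 = some b := by
  constructor <;>
    · simp only [PySem.List.pyGet?, PySem.List.pyIdx?, List.length_cons]
      rw [if_pos (by omega), if_pos (by omega)]
      simp

theorem pvKeys_dstep (d : PySem.Dict Int (PySem.Set Int)) (p : Int × Int) :
    (pvDStep d p).keys = PySem.Set.add d.keys p.1 := by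
  by_cases h : d.contains p.1 = true
  · simp only [pvDStep, h, if_pos]
    rw [PySem.Dict.keys_modify, PySem.Dict.keys_insert_of_contains _ _ h,
      PySem.Set.add_of_mem ((PySem.Dict.contains_iff_mem_keys d p.1).mp h)]
  · have h' : d.contains p.1 = false := by simpa using h
    simp only [pvDStep, h', Bool.false_eq_true, if_neg, not_false_iff]
    rw [PySem.Dict.keys_modify, PySem.Dict.keys_insert_of_contains _ _ (by simp),
      PySem.Dict.keys_insert_of_not_contains _ _ h',
      PySem.Set.add_of_not_mem (fun hm => by simp [(PySem.Dict.contains_iff_mem_keys d p.1).mpr hm] at h')]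

theorem pvGetD_dstep_self (d : PySem.Dict Int (PySem.Set Int)) (p : Int × Int) :
    (pvDStep d p).getD p.1 PySem.Set.empty = PySem.Set.add (d.getD p.1 PySem.Set.empty) p.2 := by
  by_cases h : d.contains p.1 = true
  · simp only [pvDStep, h, if_pos]
    rw [PySem.Dict.getD_modify_self]
  · have h' : d.contains p.1 = false := by simpa using h
    simp only [pvDStep, h', Bool.false_eq_true, if_neg, not_false_iff]
    rw [PySem.Dict.getD_modify_self, PySem.Dict.getD_insert_self,
      PySem.Dict.getD_of_not_contains _ _ h']

theorem pvGetD_dstep_ne (d : PySem.Dict Int (PySem.Set Int)) (p : Int × Int) (u : Int)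
    (h : u ≠ p.1) :
    (pvDStep d p).getD u PySem.Set.empty = d.getD u PySem.Set.empty := by
  by_cases hc : d.contains p.1 = true
  · simp only [pvDStep, hc, if_pos]
    rw [PySem.Dict.getD_modify_of_ne _ _ _ h]
  · have hc' : d.contains p.1 = false := by simpa using hc
    simp only [pvDStep, hc', Bool.false_eq_true, if_neg, not_false_iff]
    rw [PySem.Dict.getD_modify_of_ne _ _ _ h, PySem.Dict.getD_insert_of_ne _ _ _ h]

theorem pvKeys_dfold (PL : List (Int × Int)) (d : PySem.Dict Int (PySem.Set Int)) :
    (PL.foldl pvDStep d).keys = PySem.Set.update d.keys (PL.map (·.1)) := by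
  induction PL generalizing d with
  | nil => simp [PySem.Set.update_nil]
  | cons p t ih =>
      simp only [List.foldl_cons, List.map_cons, PySem.Set.update_cons]
      rw [ih, pvKeys_dstep]

theorem pvGetD_dfold (PL : List (Int × Int)) (d : PySem.Dict Int (PySem.Set Int)) (u : Int) :
    (PL.foldl pvDStep d).getD u PySem.Set.empty =
      PySem.Set.update (d.getD u PySem.Set.empty) ((PL.filter (fun p => p.1 == u)).map (·.2)) := by
  induction PL generalizing d with
  | nil => simp [PySem.Set.update_nil]
  | cons p t ih =>
      simp only [List.foldl_cons]
      rw [ih]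
      by_cases h : p.1 = u
      · subst h
        simp only [List.filter_cons, beq_self_eq_true, if_pos, List.map_cons,
          PySem.Set.update_cons, pvGetD_dstep_self]
      · have hne : (p.1 == u) = false := by simpa using h
        simp only [List.filter_cons, hne, Bool.false_eq_true, if_neg, not_false_iff]
        rw [pvGetD_dstep_ne _ _ _ (fun e => h e.symm)]

-- A, rewritten: fold over the distinct users, incrementing at (#distinct minutes - 1)
theorem pvA_eq (logs : List (List Int)) (k : Int) (hlen : ∀ l ∈ logs, 2 ≤ l.length) :
    findingUsersActiveMinutes logs k =
      (PySem.Set.ofList ((logs.map pvPair).map (·.1))).foldl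
        (fun r u => pyIncAt r
          (((PySem.Set.ofList (((logs.map pvPair).filter (fun p => p.1 == u)).map (·.2))).length : Int) - 1))
        (List.replicate k.toNat 0) := by
  simp only [findingUsersActiveMinutes]
  have hfold : logs.foldl (fun d log =>
      match PySem.List.pyGet? log 0, PySem.List.pyGet? log 1 with
      | some u, some m =>
          let d' := if d.contains u then d else d.insert u PySem.Set.empty
          d'.modify u PySem.Set.empty (fun s => PySem.Set.add s m)
      | _, _ => d) PySem.Dict.empty = (logs.map pvPair).foldl pvDStep PySem.Dict.empty := by
    rw [List.foldl_map]
    refine PySem.List.foldl_congr_mem _ _ _ _ ?_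
    intro acc log hlog
    rcases log with _ | ⟨a, _ | ⟨b, t⟩⟩
    · have := hlen _ hlog; simp at this
    · have := hlen _ hlog; simp at this
    · rw [(pvPyGet2 a b t).1, (pvPyGet2 a b t).2]
      simp [pvDStep, pvPair]
  rw [hfold, pvKeys_dfold, PySem.Dict.keys_empty, PySem.Set.update_nil_left]
  refine PySem.List.foldl_congr_mem _ _ _ _ ?_
  intro acc u _
  rw [pvGetD_dfold, PySem.Dict.getD_empty]
  rw [show (PySem.Set.empty : PySem.Set Int) = [] from rfl, PySem.Set.update_nil_left]

-- the `mins` half of the scan is the in-order dedup of u's minutes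
theorem bScan_fst (rest : List (Int × Int)) (u : Int) :
    (bScan rest u).1 = PySem.Set.ofList ((rest.filter (fun q => q.1 == u)).map (·.2)) := by
  suffices h : ∀ (l : List (Int × Int)) (a : List Int) (b : List (Int × Int)),
      (l.foldl (fun acc p =>
        if p.1 == u then
          (if acc.1.contains p.2 then acc.1 else acc.1 ++ [p.2], acc.2)
        else (acc.1, acc.2 ++ [p])) (a, b)).1 =
        PySem.Set.update a ((l.filter (fun q => q.1 == u)).map (·.2)) by
    rw [show (bScan rest u).1 = (rest.foldl (fun acc p =>
        if p.1 == u then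
          (if acc.1.contains p.2 then acc.1 else acc.1 ++ [p.2], acc.2)
        else (acc.1, acc.2 ++ [p])) ([], [])).1 from rfl, h rest [] [],
      PySem.Set.update_nil_left]
  intro l
  induction l with
  | nil => intro a b; simp [PySem.Set.update_nil]
  | cons p t ih =>
      intro a b
      by_cases hp : p.1 = u
      · simp only [List.foldl_cons, List.filter_cons, hp, beq_self_eq_true, if_pos,
          List.map_cons, PySem.Set.update_cons]
        rw [ih]
        rfl
      · have hb : (p.1 == u) = false := by simpa using hp
        simp only [List.foldl_cons, List.filter_cons, hb, Bool.false_eq_true, if_neg,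
          not_false_iff]
        exact ih _ _

-- filter commutes with set(...) taken in order
theorem pvOfList_filter {α : Type} [BEq α] [LawfulBEq α] (q : α → Bool) (l : List α) :
    (PySem.Set.ofList l).filter q = PySem.Set.ofList (l.filter q) := by
  induction l with
  | nil => rfl
  | cons x t ih =>
      rw [PySem.Set.ofList_cons, List.filter_cons,
        show PySem.Set.discard (PySem.Set.ofList t) x =
          (PySem.Set.ofList t).filter (fun y => !(y == x)) from rfl]
      by_cases hq : q x = true
      · simp only [hq, if_pos, List.filter_cons, PySem.Set.ofList_cons]
        rw [List.filter_comm, ih]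
        rfl
      · have hq' : q x = false := by simpa using hq
        simp only [hq', Bool.false_eq_true, if_neg, not_false_iff, List.filter_cons]
        rw [List.filter_comm, ih]
        have : ∀ y ∈ PySem.Set.ofList (t.filter q), (!(y == x)) = true := by
          intro y hy
          have hyq : q y = true := (List.mem_filter.mp ((PySem.Set.mem_ofList _ _).mp hy)).2
          simp only [Bool.not_eq_true', beq_eq_false_iff_ne]
          intro e; subst e; rw [hyq] at hq'; exact absurd hq' (by simp)
        exact List.filter_eq_self.mpr this

-- B's loop, characterised: fold over the distinct users in first-occurrence order
theorem bLoop_eq (n : Nat) (PL : List (Int × Int)) (r : List Int) (hn : PL.length ≤ n) :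
    bLoop r PL =
      (PySem.Set.ofList (PL.map (·.1))).foldl
        (fun r u => pyIncAtB r
          (((PySem.Set.ofList ((PL.filter (fun p => p.1 == u)).map (·.2))).length : Int) - 1)) r := by
  induction n generalizing PL r with
  | zero =>
      have : PL = [] := List.eq_nil_of_length_eq_zero (Nat.le_zero.mp hn)
      subst this; rw [bLoop]; rfl
  | succ n ih =>
      match PL with
      | [] => rw [bLoop]; rfl
      | p :: t =>
          rw [bLoop]
          simp only [bScan_fst, bScan_snd]
          set u := p.1 with hu
          have hpu : (p.1 == u) = true := by rw [hu]; exact beq_self_eq_true p.1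
          have hfilt : (p :: t).filter (fun q => !(q.1 == u)) = t.filter (fun q => !(q.1 == u)) := by
            simp [hpu]
          rw [hfilt]
          have hlen' : (t.filter (fun q => !(q.1 == u))).length ≤ n := by
            have := List.length_filter_le (fun q => !(q.1 == u)) t
            have ht : t.length ≤ n := by simpa using hn
            omega
          rw [ih _ _ hlen']
          -- left side after ih: fold over users of the filtered tail, from the bumped r
          have husers : PySem.Set.ofList ((p :: t).map (·.1)) =
              u :: PySem.Set.ofList ((t.filter (fun q => !(q.1 == u))).map (·.1)) := by
            rw [List.map_cons, PySem.Set.ofList_cons]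
            congr 1
            rw [show PySem.Set.discard (PySem.Set.ofList (t.map (·.1))) u =
                (PySem.Set.ofList (t.map (·.1))).filter (fun y => !(y == u)) from rfl,
              pvOfList_filter, List.filter_map]
            rfl
          rw [husers, List.foldl_cons]
          have hhead : (p :: t).filter (fun q => q.1 == u) = p :: t.filter (fun q => q.1 == u) := by
            simp [hpu]
          rw [hhead]
          refine PySem.List.foldl_congr_mem _ _ _ _ ?_
          intro acc v hv
          have hvne : v ≠ u := by
            have hv' := (PySem.Set.mem_ofList _ _).mp hv
            rcases List.mem_map.mp hv' with ⟨q, hq, rfl⟩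
            have := (List.mem_filter.mp hq).2
            simpa using this
          have hsame : (t.filter (fun q => !(q.1 == u))).filter (fun q => q.1 == v) =
              (p :: t).filter (fun q => q.1 == v) := by
            rw [List.filter_cons]
            have hpv : (p.1 == v) = false := by
              simp only [beq_eq_false_iff_ne]; intro e; exact hvne (by rw [← e, hu])
            simp only [hpv, Bool.false_eq_true, if_neg, not_false_iff]
            rw [List.filter_comm]
            refine List.filter_eq_self.mpr ?_
            intro q hq
            have : (q.1 == v) = true := (List.mem_filter.mp hq).2
            have hq1 : q.1 = v := by simpa using this
            simp only [Bool.not_eq_true', beq_eq_false_iff_ne]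
            intro e; exact hvne (hq1 ▸ e ▸ rfl)
          rw [hsame]

-- B unfolded to the same fold as A
theorem pvB_eq (logs : List (List Int)) (k : Int) (hlen : ∀ l ∈ logs, 2 ≤ l.length) :
    findingUsersActiveMinutes_alt logs k =
      (PySem.Set.ofList ((logs.map pvPair).map (·.1))).foldl
        (fun r u => pyIncAtB r
          (((PySem.Set.ofList (((logs.map pvPair).filter (fun p => p.1 == u)).map (·.2))).length : Int) - 1))
        (List.replicate k.toNat 0) := by
  simp only [findingUsersActiveMinutes_alt]
  have hfm : logs.filterMap (fun log =>
      (PySem.List.pyGet? log 0).bind (fun u =>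
        (PySem.List.pyGet? log 1).map (fun m => (u, m)))) = logs.map pvPair := by
    induction logs with
    | nil => rfl
    | cons l t ih =>
        rcases l with _ | ⟨a, _ | ⟨b, t2⟩⟩
        · have := hlen _ (List.mem_cons_self ..); simp at this
        · have := hlen _ (List.mem_cons_self ..); simp at this
        · rw [List.filterMap_cons, List.map_cons, (pvPyGet2 a b t2).1, (pvPyGet2 a b t2).2,
            ih (fun x hx => hlen x (List.mem_cons_of_mem _ hx))]
          simp [pvPair]
  rw [hfm]
  exact bLoop_eq (logs.map pvPair).length _ _ (Nat.le_refl _)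

-- ===== VERDICT =====
theorem findingUsersActiveMinutes_spec : Claim_equal_findingUsersActiveMinutes := by
  intro logs k _hdom hpre
  obtain ⟨hlen, -⟩ := hpre
  unfold Spec_findingUsersActiveMinutes
  rw [pvA_eq logs k hlen, pvB_eq logs k hlen]
  rfl
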